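-- pv_equiv track=rewrite | github.com/appugowdahc/HackerRank_problems | easy_problems/jumping-on-the-clouds-revisited.py | cloud_hopping_energy
-- ===== SOURCE A (Python) =====
-- def cloud_hopping_energy(c, k, E):
--     n = len(c)  # Number of clouds
--     position = 0  # Starting at the first cloud
--     energy = E
--
--     while True:
--         # Jump to the next cloud
--         position = (position + k) % n
--         # Reduce energy by 1 unit for the jump
--         energy -= 1
--         # Reduce additional 2 units if it's a thundercloud
--         if c[position] == 1:
--             energy -= 2
--         # Check if the character has returned to the starting position
--         if position == 0:
--             break
--
--     return energy
-- ===== SOURCE B (Python) =====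
-- def _gcd(a, b):
--     a, b = abs(a), abs(b)
--     while b:
--         a, b = b, a % b
--     return a
--
--
-- def cloud_hopping_energy(c, k, E):
--     n = len(c)
--     g = _gcd(n, k)
--     jumps = n // g
--     thunder = 0
--     for i in range(0, n, g):
--         if c[i] == 1:
--             thunder += 1
--     return E - jumps - 2 * thunder
-- ===== Notes on version B (the rewrite author's own statement) =====
-- stated objective: faster
-- what changed: Replaces the step-by-step while-loop simulation of jumps with a number-theoretic derivation: with g = gcd(len(c), k), the visited positions are exactly range(0, len(c), g) and the jump count is len(c)//g, so B computes the energy from one stride-g scan with no modular position update per jump.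
import Mathlib
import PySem

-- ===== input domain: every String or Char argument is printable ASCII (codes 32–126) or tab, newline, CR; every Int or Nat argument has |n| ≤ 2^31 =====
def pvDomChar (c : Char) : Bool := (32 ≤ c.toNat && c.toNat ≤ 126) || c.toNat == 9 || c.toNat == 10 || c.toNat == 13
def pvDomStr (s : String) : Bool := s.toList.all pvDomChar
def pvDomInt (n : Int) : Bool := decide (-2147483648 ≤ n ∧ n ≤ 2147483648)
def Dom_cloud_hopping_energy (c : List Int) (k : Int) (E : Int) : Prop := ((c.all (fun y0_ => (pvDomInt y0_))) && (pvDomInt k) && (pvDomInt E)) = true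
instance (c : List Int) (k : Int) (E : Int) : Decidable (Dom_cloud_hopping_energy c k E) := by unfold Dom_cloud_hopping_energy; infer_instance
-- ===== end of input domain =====

-- B replaces A's while-loop simulation of the cyclic jumps by the gcd closed form
-- (visited positions are exactly the stride-gcd multiples); equivalence is proved for
-- every non-empty c (on empty c, A's '% 0' raises ZeroDivisionError).

-- ===== PORT A =====
-- The while-True loop, as fuel recursion.  For c ≠ [] the loop provably breaks within
-- c.length iterations (position after j jumps is j*k mod n, and n*k mod n = 0), so the
-- fuel c.length below is inert: it only makes the recursion total.  'c[position]' is
-- ported as pyGetD with default 0, exact here since 0 ≤ position < c.length always.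
def cloudLoopA (c : List Int) (k : Int) (n : Int) : Nat → Int → Int → Int
  | 0, _, energy => energy
  | fuel+1, position, energy =>
    let position' := PySem.Int.mod (position + k) n
    let energy' := energy - 1
    let energy'' := if PySem.List.pyGetD c position' 0 = 1 then energy' - 2 else energy'
    if position' = 0 then energy'' else cloudLoopA c k n fuel position' energy''

def cloud_hopping_energy (c : List Int) (k : Int) (E : Int) : Int :=
  cloudLoopA c k (c.length : Int) c.length 0 E

-- ===== PORT B =====
-- Source B's hand-written Euclid helper _gcd (abs both arguments, then loop).
def myGcdFuel : Nat → Nat → Nat → Nat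
  | 0, a, _ => a
  | f+1, a, b => if b = 0 then a else myGcdFuel f b (a % b)

-- the loop's second argument strictly decreases, so fuel b+1 is inert
def myGcd (a b : Nat) : Nat := myGcdFuel (b + 1) a b

def cloud_hopping_energy_alt (c : List Int) (k : Int) (E : Int) : Int :=
  let n : Int := (c.length : Int)
  let g : Int := (myGcd n.natAbs k.natAbs : Int)
  let jumps : Int := PySem.Int.floordiv n g
  let thunder : Int := (PySem.List.pyRange 0 n g).foldl
    (fun acc i => if PySem.List.pyGetD c i 0 = 1 then acc + 1 else acc) 0
  E - jumps - 2 * thunder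

-- ===== PRECONDITION & SPEC =====
-- Pre_ excludes exactly the empty cloud list, on which A raises ZeroDivisionError ('% 0').
def Pre_cloud_hopping_energy (c : List Int) (k : Int) (E : Int) : Prop := c ≠ []
instance (c : List Int) (k : Int) (E : Int) : Decidable (Pre_cloud_hopping_energy c k E) := by
  unfold Pre_cloud_hopping_energy; infer_instance

def pvWitness_cloud_hopping_energy : List Int × Int × Int := ([1, 0, 1, 0, 0, 1], 2, 100)

def Spec_cloud_hopping_energy (c : List Int) (k : Int) (E : Int) (out : Int) : Prop := out = cloud_hopping_energy_alt c k E
instance (c : List Int) (k : Int) (E : Int) (out : Int) : Decidable (Spec_cloud_hopping_energy c k E out) := by unfold Spec_cloud_hopping_energy; infer_instance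

-- ===== CLAIM (what is proved, stated in full; the proofs are below) =====
def Claim_equal_cloud_hopping_energy : Prop := ∀ (c : List Int) (k : Int) (E : Int), Dom_cloud_hopping_energy c k E → Pre_cloud_hopping_energy c k E → Spec_cloud_hopping_energy c k E (cloud_hopping_energy c k E)


-- ===== LEMMAS AND PROOFS =====

theorem myGcdFuel_eq (f a b : Nat) (h : b < f) : myGcdFuel f a b = Nat.gcd a b := by
  induction f generalizing a b with
  | zero => omega
  | succ f ih =>
    by_cases hb : b = 0
    · simp [myGcdFuel, hb]
    · have hlt : a % b < f := lt_of_lt_of_le (Nat.mod_lt a (Nat.pos_of_ne_zero hb)) (by omega)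
      have := ih b (a % b) hlt
      simp only [myGcdFuel, hb, if_false, this]
      rw [Nat.gcd_comm b (a % b), ← Nat.gcd_rec, Nat.gcd_comm]

theorem myGcd_eq_gcd (a b : Nat) : myGcd a b = Nat.gcd a b :=
  myGcdFuel_eq (b + 1) a b (by omega)

-- Nat core fact: n ∣ j*K ↔ (n / gcd n K) ∣ j.
theorem stop_iff (n K j : Nat) (hn : 0 < n) :
    n ∣ j * K ↔ n / Nat.gcd n K ∣ j := by
  set g := Nat.gcd n K with hgdef
  have hg : 0 < g := Nat.gcd_pos_of_pos_left K hn
  have hgn : g ∣ n := Nat.gcd_dvd_left n K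
  have hgK : g ∣ K := Nat.gcd_dvd_right n K
  obtain ⟨n', hn'⟩ := hgn
  obtain ⟨K', hK'⟩ := hgK
  have hcop : Nat.Coprime n' K' := by
    have := Nat.coprime_div_gcd_div_gcd (m := n) (n := K) hg
    rwa [← hgdef, hn', hK', Nat.mul_div_cancel_left _ hg, Nat.mul_div_cancel_left _ hg] at this
  have hdivn : n / g = n' := by rw [hn', Nat.mul_div_cancel_left _ hg]
  rw [hdivn]
  constructor
  · intro h
    rw [hn', hK'] at h
    have h2 : n' ∣ j * K' := by
      have : g * n' ∣ g * (j * K') := by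
        calc g * n' ∣ j * (g * K') := h
        _ = g * (j * K') := by ring
      exact (Nat.mul_dvd_mul_iff_left hg).mp this
    exact hcop.dvd_of_dvd_mul_right h2
  · intro ⟨t, ht⟩
    rw [hn', hK', ht]
    exact ⟨t * K', by ring⟩

-- the loop run lemma
theorem loopA_run (c : List Int) (k N : Int) (m : Nat) (hN : 0 < N)
    (hzero : ∀ j : Nat, (PySem.Int.mod ((j : Int) * k) N = 0 ↔ m ∣ j)) :
    ∀ (r j fuel : Nat) (e : Int), j + (r + 1) = m → r + 1 ≤ fuel →
      cloudLoopA c k N fuel (PySem.Int.mod ((j : Int) * k) N) e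
        = e - (r + 1) - ((List.range (r + 1)).map (fun t =>
            if PySem.List.pyGetD c (PySem.Int.mod (((j + t + 1 : Nat) : Int) * k) N) 0 = 1
            then (2 : Int) else 0)).sum := by
  intro r
  induction r with
  | zero =>
    intro j fuel e hj hfuel
    obtain ⟨f, rfl⟩ : ∃ f, fuel = f + 1 := ⟨fuel - 1, by omega⟩
    have hstep : PySem.Int.mod (PySem.Int.mod ((j : Int) * k) N + k) N
        = PySem.Int.mod (((j + 1 : Nat) : Int) * k) N := by
      rw [PySem.Int.mod_eq_emod_of_pos hN, PySem.Int.mod_eq_emod_of_pos hN,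
          PySem.Int.mod_eq_emod_of_pos hN]
      rw [Int.add_emod ((j : Int) * k % N) k, Int.emod_emod_of_dvd _ dvd_rfl, ← Int.add_emod]
      congr 1
      push_cast
      ring
    have hbrk : PySem.Int.mod (((j + 1 : Nat) : Int) * k) N = 0 := by
      rw [hzero]
      exact ⟨1, by omega⟩
    simp only [cloudLoopA, hstep, hbrk, List.range_succ, List.range_zero,
      List.nil_append, List.map_cons, List.map_nil, List.sum_cons, List.sum_nil]
    norm_num
    split_ifs <;> ring
  | succ r ih =>
    intro j fuel e hj hfuel
    obtain ⟨f, rfl⟩ : ∃ f, fuel = f + 1 := ⟨fuel - 1, by omega⟩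
    have hstep : PySem.Int.mod (PySem.Int.mod ((j : Int) * k) N + k) N
        = PySem.Int.mod (((j + 1 : Nat) : Int) * k) N := by
      rw [PySem.Int.mod_eq_emod_of_pos hN, PySem.Int.mod_eq_emod_of_pos hN,
          PySem.Int.mod_eq_emod_of_pos hN]
      rw [Int.add_emod ((j : Int) * k % N) k, Int.emod_emod_of_dvd _ dvd_rfl, ← Int.add_emod]
      congr 1
      push_cast
      ring
    have hnbrk : PySem.Int.mod (((j + 1 : Nat) : Int) * k) N ≠ 0 := by
      intro h0
      obtain ⟨t, ht⟩ := (hzero (j + 1)).mp h0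
      rcases t with _ | t
      · omega
      · have : m * 1 ≤ m * (t + 1) := Nat.mul_le_mul_left m (by omega)
        omega
    have hrec := ih (j + 1) f
      (e - 1 - (if PySem.List.pyGetD c (PySem.Int.mod (((j + 1 : Nat) : Int) * k) N) 0 = 1
        then (2 : Int) else 0))
      (by omega) (by omega)
    simp only [cloudLoopA, hstep, if_neg hnbrk]
    have hmatch : cloudLoopA c k N f (PySem.Int.mod (((j + 1 : Nat) : Int) * k) N)
        (if PySem.List.pyGetD c (PySem.Int.mod (((j + 1 : Nat) : Int) * k) N) 0 = 1
          then e - 1 - 2 else e - 1)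
        = cloudLoopA c k N f (PySem.Int.mod (((j + 1 : Nat) : Int) * k) N)
          (e - 1 - (if PySem.List.pyGetD c (PySem.Int.mod (((j + 1 : Nat) : Int) * k) N) 0 = 1
            then (2 : Int) else 0)) := by
      split_ifs <;> ring_nf
    rw [hmatch, hrec]
    rw [show List.range (r + 1 + 1) = 0 :: List.map Nat.succ (List.range (r + 1)) from
      List.range_succ_eq_map]
    simp only [List.map_cons, List.map_map, List.sum_cons, Function.comp_def, Nat.succ_eq_add_one,
      Nat.add_zero]
    have hidx : ∀ t : Nat, j + (t + 1) + 1 = j + 1 + t + 1 := by omega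
    simp only [hidx]
    push_cast
    ring

theorem toFinset_map_list {α β : Type} [DecidableEq α] [DecidableEq β] (f : α → β)
    (l : List α) : (l.map f).toFinset = l.toFinset.image f := by
  ext x
  simp

theorem sum_ite_two {α : Type} (p : α → Prop) [DecidablePred p] (l : List α) :
    (l.map (fun x => if p x then (2 : Int) else 0)).sum
      = 2 * (l.countP (fun x => decide (p x)) : Int) := by
  induction l with
  | nil => simp
  | cons a l ih =>
    simp only [List.map_cons, List.sum_cons, ih, List.countP_cons]
    by_cases h : p a <;> simp [h] <;> push_cast <;> ring

theorem main_eq (c : List Int) (k E : Int) (hc : c ≠ []) :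
    cloud_hopping_energy c k E = cloud_hopping_energy_alt c k E := by
  set n := c.length with hn_def
  have hn : 0 < n := List.length_pos_iff.mpr hc
  set K := k.natAbs with hK_def
  set g := Nat.gcd n K with hg_def
  have hg : 0 < g := Nat.gcd_pos_of_pos_left K hn
  set m := n / g with hm_def
  have hgm : g * m = n := Nat.mul_div_cancel' (Nat.gcd_dvd_left n K)
  have hm : 0 < m := Nat.div_pos (Nat.le_of_dvd hn (Nat.gcd_dvd_left n K)) hg
  have hN : (0 : Int) < (n : Int) := by exact_mod_cast hn
  have hgZ : (0 : Int) < (g : Int) := by exact_mod_cast hg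
  have hbridge : ∀ j : Nat, ((n : Int) ∣ (j : Int) * k ↔ n ∣ j * K) := by
    intro j
    rw [← Int.natAbs_dvd_natAbs]
    simp [Int.natAbs_mul, hK_def]
  have hzero : ∀ j : Nat, (PySem.Int.mod ((j : Int) * k) (n : Int) = 0 ↔ m ∣ j) := by
    intro j
    rw [PySem.Int.mod_eq_zero_iff_dvd, hbridge, stop_iff n K j hn]
  -- A-side: run the loop to the first return to position 0, after exactly m jumps
  have hA : cloud_hopping_energy c k E
      = E - m - 2 * (((List.range m).map
          (fun t : Nat => PySem.Int.mod (((t + 1 : Nat) : Int) * k) (n : Int))).countP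
            (fun x => decide (PySem.List.pyGetD c x 0 = 1)) : Int) := by
    obtain ⟨r, hr⟩ : ∃ r, m = r + 1 := ⟨m - 1, by omega⟩
    have hmn : m ≤ n := Nat.div_le_self n g
    have hrun := loopA_run c k (n : Int) m hN hzero r 0 n E (by omega) (by omega)
    have h0 : PySem.Int.mod (((0 : Nat) : Int) * k) (n : Int) = 0 :=
      (hzero 0).mpr (dvd_zero m)
    have hstart : cloud_hopping_energy c k E
        = cloudLoopA c k (n : Int) n (PySem.Int.mod (((0 : Nat) : Int) * k) (n : Int)) E := by
      rw [h0]; rfl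
    rw [hstart, hrun, ← hr]
    have hcast : ((r : Int) + 1) = (m : Int) := by rw [hr]; push_cast; ring
    rw [hcast]
    simp only [Nat.zero_add]
    rw [sum_ite_two (fun t : Nat =>
      PySem.List.pyGetD c (PySem.Int.mod (((t + 1 : Nat) : Int) * k) (n : Int)) 0 = 1)]
    rw [List.countP_map]
    rfl
  -- B-side: unfold the closed form
  have hB : cloud_hopping_energy_alt c k E
      = E - m - 2 * (((List.range m).map (fun t : Nat => (g : Int) * (t : Int))).countP
          (fun x => decide (PySem.List.pyGetD c x 0 = 1)) : Int) := by
    show E - PySem.Int.floordiv (n : Int) ((myGcd ((n : Int)).natAbs k.natAbs : Nat) : Int)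
        - 2 * ((PySem.List.pyRange 0 (n : Int) ((myGcd ((n : Int)).natAbs k.natAbs : Nat) : Int)).foldl
            (fun acc i => if PySem.List.pyGetD c i 0 = 1 then acc + 1 else acc) 0)
      = E - m - 2 * (((List.range m).map (fun t : Nat => (g : Int) * (t : Int))).countP
          (fun x => decide (PySem.List.pyGetD c x 0 = 1)) : Int)
    rw [show ((n : Int)).natAbs = n from Int.natAbs_natCast n, myGcd_eq_gcd, ← hK_def, ← hg_def]
    rw [PySem.Int.floordiv_natCast n g, ← hm_def]
    rw [PySem.List.foldl_ite_add_one (fun x => PySem.List.pyGetD c x 0 = 1)]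
    have hrange : PySem.List.pyRange 0 (n : Int) (g : Int)
        = (List.range m).map (fun t : Nat => (g : Int) * (t : Int)) := by
      rw [PySem.List.pyRange_of_pos 0 (n : Int) hgZ, if_pos hN]
      have hq : ((n : Int) - 0 + (g : Int) - 1) / (g : Int) = (m : Int) := by
        have h1 : (n : Int) - 0 + (g : Int) - 1 = ((g : Int) - 1) + (m : Int) * (g : Int) := by
          have h2 : (n : Int) = (g : Int) * (m : Int) := by exact_mod_cast hgm.symm
          rw [h2]; ring
        rw [h1, Int.add_mul_ediv_right _ _ (ne_of_gt hgZ),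
          Int.ediv_eq_zero_of_lt (by omega) (by omega)]
        ring
      rw [hq]
      simp only [Int.toNat_natCast, zero_add]
    rw [hrange, zero_add]
  -- the two position lists are permutations of each other
  have hAmem : ∀ i : Nat, (0 : Int) ≤ PySem.Int.mod (((i + 1 : Nat) : Int) * k) (n : Int)
      ∧ PySem.Int.mod (((i + 1 : Nat) : Int) * k) (n : Int) < (n : Int)
      ∧ (g : Int) ∣ PySem.Int.mod (((i + 1 : Nat) : Int) * k) (n : Int) := by
    intro i
    rw [PySem.Int.mod_eq_emod_of_pos hN]
    refine ⟨Int.emod_nonneg _ (ne_of_gt hN), Int.emod_lt_of_pos _ hN, ?_⟩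
    have hgk : (g : Int) ∣ k := by
      have h1 : (g : Int) ∣ (K : Int) := by exact_mod_cast Nat.gcd_dvd_right n K
      exact h1.trans (Int.natAbs_dvd.mpr dvd_rfl)
    have hgn : (g : Int) ∣ (n : Int) := by exact_mod_cast Nat.gcd_dvd_left n K
    rw [Int.emod_def]
    exact dvd_sub (hgk.mul_left _) (hgn.mul_right _)
  have hinj : ∀ a b : Nat, a < m → b < m →
      PySem.Int.mod (((a + 1 : Nat) : Int) * k) (n : Int)
        = PySem.Int.mod (((b + 1 : Nat) : Int) * k) (n : Int) → a = b := by
    have key : ∀ a b : Nat, a ≤ b → b < m →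
        PySem.Int.mod (((a + 1 : Nat) : Int) * k) (n : Int)
          = PySem.Int.mod (((b + 1 : Nat) : Int) * k) (n : Int) → a = b := by
      intro a b hab hbm heq
      rw [PySem.Int.mod_eq_emod_of_pos hN, PySem.Int.mod_eq_emod_of_pos hN] at heq
      have hdvd : (n : Int) ∣ ((b + 1 : Nat) : Int) * k - ((a + 1 : Nat) : Int) * k :=
        Int.ModEq.dvd heq
      have hcast : ((b + 1 : Nat) : Int) * k - ((a + 1 : Nat) : Int) * k
          = ((b - a : Nat) : Int) * k := by
        push_cast [Nat.cast_sub hab]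
        ring
      rw [hcast, hbridge] at hdvd
      have hmd : m ∣ b - a := (stop_iff n K (b - a) hn).mp hdvd
      rcases Nat.eq_zero_or_pos (b - a) with h | h
      · omega
      · have := Nat.le_of_dvd h hmd
        omega
    intro a b ham hbm heq
    rcases le_total a b with h | h
    · exact key a b h hbm heq
    · exact (key b a h ham heq.symm).symm
  have hperm : ((List.range m).map
        (fun t : Nat => PySem.Int.mod (((t + 1 : Nat) : Int) * k) (n : Int))).Perm
      ((List.range m).map (fun t : Nat => (g : Int) * (t : Int))) := by
    apply List.perm_of_nodup_nodup_toFinset_eq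
    · apply List.Nodup.map_on _ (List.nodup_range)
      intro x hx y hy hxy
      exact hinj x y (List.mem_range.mp hx) (List.mem_range.mp hy) hxy
    · apply List.Nodup.map_on _ (List.nodup_range)
      intro x _ y _ hxy
      exact_mod_cast mul_left_cancel₀ (ne_of_gt hgZ) hxy
    · rw [toFinset_map_list, toFinset_map_list, List.toFinset_range]
      apply Finset.eq_of_subset_of_card_le
      · intro x hx
        obtain ⟨i, hi, rfl⟩ := Finset.mem_image.mp hx
        obtain ⟨hx0, hxn, t, ht⟩ := hAmem i
        have ht0 : 0 ≤ t := by
          by_contra hneg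
          push_neg at hneg
          have h1 : (g : Int) * t < 0 := mul_neg_of_pos_of_neg hgZ hneg
          rw [ht] at hx0
          linarith
        refine Finset.mem_image.mpr ⟨t.toNat, Finset.mem_range.mpr ?_, ?_⟩
        · have htm : t < (m : Int) := by
            have hnm : (n : Int) = (g : Int) * (m : Int) := by exact_mod_cast hgm.symm
            rw [ht, hnm] at hxn
            exact lt_of_mul_lt_mul_left hxn (le_of_lt hgZ)
          omega
        · rw [Int.toNat_of_nonneg ht0, ← ht]
      · have c1 : (Finset.image (fun t : Nat => (g : Int) * (t : Int)) (Finset.range m)).card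
            = m := by
          rw [Finset.card_image_of_injOn, Finset.card_range]
          intro x _ y _ hxy
          exact_mod_cast mul_left_cancel₀ (ne_of_gt hgZ) hxy
        have c2 : (Finset.image
            (fun t : Nat => PySem.Int.mod (((t + 1 : Nat) : Int) * k) (n : Int))
            (Finset.range m)).card = m := by
          rw [Finset.card_image_of_injOn, Finset.card_range]
          intro x hx y hy hxy
          exact hinj x y (by simpa using hx) (by simpa using hy) hxy
        omega
  rw [hA, hB, List.Perm.countP_eq _ hperm]

-- ===== VERDICT (by name: the statement is the Claim_ definition above) =====
theorem cloud_hopping_energy_spec : Claim_equal_cloud_hopping_energy := by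
  intro c k E _ hpre
  unfold Spec_cloud_hopping_energy
  exact main_eq c k E hpre
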